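-- pv_equiv track=rewrite | github.com/sakurasakura1996/Leetcode | 二分查找/二分查找模板.py | searchLeftRange
-- ===== SOURCE A (Python) =====
-- from typing import List
--
-- def searchLeftRange(nums: List[int], target: int) -> int:
--     """
--     nums数组有重复元素，查找到目标值的左边界，如果没有目标值返回-1
--     这个问题和找有边界是一样的，就比较复杂了。
--     我们定义left = 0，right = len(nums),也就是查找区间是左闭右开的，这个时候 left = right的时候，就可以推出循环了
--     所以 while循环的判断就是 while left < right: 后面的分析就在代码里面说吧。
--     :param nums:
--     :param target:
--     :return:
--     """
--     left = 0
--     right = len(nums)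
--     while left < right:
--         # 这里我们一定要记得，循环退出的时候，一定是left==right，所以return left和right都可以，
--         # 并且，在分析后面left，right取值的时候，可以举个例子来看，就是right = left + 1的时候。
--         # 比如      left   right
--         #            |      |
--         #            7      8
--         # 我们可以就考虑上面的情况，记得考虑两种情况，就是target = 7，或者 target = 8 的情况。
--         # 可以发现，最后，left只要往左移动，就可以了。
--         mid = left + (right - left) // 2
--         # 师弟说这种情况是不需要单独判断 nums[mid] == target的，确实。
--         if nums[mid] < target:
--             left = mid + 1   # notice:
--         else:
--             right = mid        # notice 我们要注意，这里的right = mid并不是说就取不到了。取不到的概念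
--             # 我们只用考虑在while循环判断那里有没有等于号就行。
--     if left == len(nums) or nums[left] != target:
--         return -1
--     return left
-- ===== SOURCE B (Python) =====
-- from typing import List
--
-- def _locate(seg, off, target):
--     # Narrow the current slice of the array instead of moving index bounds:
--     # seg is nums[off:off+len(seg)]; return the absolute left-boundary index.
--     if not seg:
--         return off
--     mid = len(seg) // 2
--     if seg[mid] < target:
--         return _locate(seg[mid + 1:], off + mid + 1, target)
--     return _locate(seg[:mid], off, target)
--
-- def searchLeftRange(nums: List[int], target: int) -> int:
--     idx = _locate(nums, 0, target)
--     if idx == len(nums) or nums[idx] != target: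
--         return -1
--     return idx
-- ===== Notes on version B (the rewrite author's own statement) =====
-- stated objective: alternative
-- what changed: A mutates index bounds left/right in a while loop over the whole array; B recurses on ever-smaller list slices carrying an absolute offset (divide-and-conquer on the segment itself), picking the same midpoint element so the boundary index is identical.
import Mathlib
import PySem

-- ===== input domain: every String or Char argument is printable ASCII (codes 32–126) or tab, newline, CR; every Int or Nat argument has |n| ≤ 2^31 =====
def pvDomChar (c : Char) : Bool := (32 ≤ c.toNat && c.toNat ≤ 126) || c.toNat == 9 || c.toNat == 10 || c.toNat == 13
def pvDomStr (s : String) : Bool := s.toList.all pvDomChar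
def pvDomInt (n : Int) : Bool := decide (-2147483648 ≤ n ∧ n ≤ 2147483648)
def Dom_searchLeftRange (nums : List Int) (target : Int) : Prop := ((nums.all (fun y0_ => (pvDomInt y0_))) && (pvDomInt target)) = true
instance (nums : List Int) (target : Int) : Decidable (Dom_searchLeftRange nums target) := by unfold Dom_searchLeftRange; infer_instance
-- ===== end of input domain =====

-- B replaces A's index-bound while loop by divide-and-conquer recursion on list slices
-- carrying an absolute offset, choosing the same midpoint element (objective: alternative).

-- ===== PORT A =====
-- A's while-loop; mid always satisfies left ≤ mid < right ≤ len, so the getD 0 default is never taken.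
def searchLeftRangeLoop (nums : List Int) (target : Int) (left right : Int) : Int :=
  if h : left < right then
    let mid := left + PySem.Int.floordiv (right - left) 2
    if (PySem.List.pyGet? nums mid).getD 0 < target then
      searchLeftRangeLoop nums target (mid + 1) right
    else
      searchLeftRangeLoop nums target left mid
  else left
termination_by (right - left).toNat
decreasing_by
  all_goals
    have := PySem.Int.floordiv_eq_ediv_of_pos (a := right - left) (b := 2) (by omega)
    omega

def searchLeftRange (nums : List Int) (target : Int) : Int :=
  let left := searchLeftRangeLoop nums target 0 (nums.length : Int)
  if left = (nums.length : Int) ∨ (PySem.List.pyGet? nums left).getD 0 ≠ target then -1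
  else left

-- ===== PORT B =====
-- B's _locate: recursion on the current slice seg = nums[off:off+len(seg)];
-- 'if not seg' is 'seg = []'; mid = len(seg)//2 is Nat division (len(seg) ≥ 0);
-- seg[mid] in range, so the getD 0 default is never taken.
def locateSeg (seg : List Int) (off : Int) (target : Int) : Int :=
  if seg = [] then off
  else
    let mid : Nat := seg.length / 2
    if (PySem.List.pyGet? seg (mid : Int)).getD 0 < target then
      locateSeg (PySem.List.slice seg (some ((mid : Int) + 1)) none) (off + (mid : Int) + 1) target
    else
      locateSeg (PySem.List.slice seg none (some (mid : Int))) off target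
termination_by seg.length
decreasing_by
  · have h1 : ((seg.length / 2 : Nat) : Int) + 1 = (((seg.length / 2 + 1 : Nat)) : Int) := by push_cast; ring
    rw [h1, PySem.List.slice_from_natCast]
    simp only [List.length_drop]
    have : 0 < seg.length := List.length_pos_iff.mpr (by assumption)
    omega
  · rw [PySem.List.slice_to_natCast]
    simp only [List.length_take]
    have : 0 < seg.length := List.length_pos_iff.mpr (by assumption)
    omega

def searchLeftRange_alt (nums : List Int) (target : Int) : Int :=
  let idx := locateSeg nums 0 target
  if idx = (nums.length : Int) ∨ (PySem.List.pyGet? nums idx).getD 0 ≠ target then -1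
  else idx

-- ===== PRECONDITION & SPEC =====
def Spec_searchLeftRange (nums : List Int) (target : Int) (out : Int) : Prop := out = searchLeftRange_alt nums target
instance (nums : List Int) (target : Int) (out : Int) : Decidable (Spec_searchLeftRange nums target out) := by unfold Spec_searchLeftRange; infer_instance

-- ===== CLAIM (what is proved, stated in full; the proofs are below) =====
def Claim_equal_searchLeftRange : Prop := ∀ (nums : List Int) (target : Int), Dom_searchLeftRange nums target → Spec_searchLeftRange nums target (searchLeftRange nums target)

-- ===== LEMMAS AND PROOFS =====
-- Invariant: A's loop on bounds (l, r) computes what B's _locate computes on the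
-- slice nums[l:r] with offset l, because both probe the same absolute midpoint.
theorem loop_eq_locate (nums : List Int) (target : Int) (l r : Int)
    (h0 : 0 ≤ l) (hlr : l ≤ r) (hr : r ≤ (nums.length : Int)) :
    searchLeftRangeLoop nums target l r =
      locateSeg ((nums.drop l.toNat).take (r - l).toNat) l target := by
  by_cases h : l < r
  · have hfd : PySem.Int.floordiv (r - l) 2 = (r - l) / 2 :=
      PySem.Int.floordiv_eq_ediv_of_pos (by omega)
    have hlen : ((nums.drop l.toNat).take (r - l).toNat).length = (r - l).toNat := by
      simp only [List.length_take, List.length_drop]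
      omega
    have hne : (nums.drop l.toNat).take (r - l).toNat ≠ [] := by
      intro hnil; rw [hnil] at hlen; simp at hlen; omega
    set m : Nat := (r - l).toNat / 2 with hm
    have hmid : l + PySem.Int.floordiv (r - l) 2 = l + (m : Int) := by
      rw [hfd, hm]; omega
    have hmlt : m < (r - l).toNat := by omega
    have hidx : l.toNat + m < nums.length := by omega
    have hgetB : (PySem.List.pyGet? ((nums.drop l.toNat).take (r - l).toNat) (m : Int)).getD 0
        = nums[l.toNat + m] := by
      rw [PySem.List.pyGet?_natCast]
      rw [List.getElem?_take_of_lt (by omega), List.getElem?_drop]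
      rw [List.getElem?_eq_getElem hidx]; rfl
    have hgetA : (PySem.List.pyGet? nums (l + (m : Int))).getD 0 = nums[l.toNat + m] := by
      rw [PySem.List.pyGet?_of_nonneg (xs := nums) (i := l + (m : Int)) (by omega)]
      rw [show (l + (m : Int)).toNat = l.toNat + m by omega]
      rw [List.getElem?_eq_getElem hidx]; rfl
    rw [searchLeftRangeLoop, dif_pos h, locateSeg, if_neg hne]
    simp only [hlen, ← hm, hmid, hgetA, hgetB]
    split_ifs with hc
    · have h1 : ((m : Int) + 1) = ((m + 1 : Nat) : Int) := by push_cast; ring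
      rw [h1, PySem.List.slice_from_natCast, List.drop_take, List.drop_drop]
      have e1 : l.toNat + (m + 1) = (l + (m : Int) + 1).toNat := by omega
      have e2 : (r - l).toNat - (m + 1) = (r - (l + (m : Int) + 1)).toNat := by omega
      rw [e1, e2]
      exact loop_eq_locate nums target (l + (m : Int) + 1) r (by omega) (by omega) hr
    · rw [PySem.List.slice_to_natCast, List.take_take, min_eq_left (by omega)]
      have e1 : m = (l + (m : Int) - l).toNat := by omega
      rw [show (nums.drop l.toNat).take m = (nums.drop l.toNat).take (l + (m : Int) - l).toNat by rw [← e1]]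
      exact loop_eq_locate nums target l (l + (m : Int)) h0 (by omega) (by omega)
  · rw [searchLeftRangeLoop, dif_neg h]
    have : (r - l).toNat = 0 := by omega
    rw [this]
    simp [locateSeg]
termination_by (r - l).toNat
decreasing_by all_goals omega

-- ===== VERDICT (by name: the statement is the Claim_ definition above) =====
theorem searchLeftRange_spec : Claim_equal_searchLeftRange := by
  intro nums target _
  unfold Spec_searchLeftRange searchLeftRange searchLeftRange_alt
  rw [loop_eq_locate nums target 0 (nums.length : Int) le_rfl (by positivity) le_rfl]
  simp
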